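-- pv_equiv track=rewrite | github.com/alexandergolbergwix/pipeline | ner/postprocessing_rules.py | detect_latin_script
-- ===== SOURCE A (Python) =====
-- from typing import List, Tuple, Dict
--
-- def detect_latin_script(text: str) -> List[Tuple[int, int]]:
--     """
--     Detect Latin script segments in Hebrew text
--
--     Args:
--         text: Input text
--
--     Returns:
--         List of (start, end) positions of Latin segments
--     """
--     latin_segments = []
--     current_start = None
--
--     for i, char in enumerate(text):
--         is_latin = (
--             ('A' <= char <= 'Z') or
--             ('a' <= char <= 'z') or
--             char in "'-."
--         )
--
--         if is_latin and current_start is None: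
--             current_start = i
--         elif not is_latin and current_start is not None:
--             if i - current_start > 2:  # Minimum 3 characters
--                 latin_segments.append((current_start, i))
--             current_start = None
--
--     # Handle case where text ends with Latin
--     if current_start is not None:
--         latin_segments.append((current_start, len(text)))
--
--     return latin_segments
-- ===== SOURCE B (Python) =====
-- def detect_latin_script(text):
--     """Run-scanner: jump over maximal Latin runs, keep those of length > 2
--     (a run that reaches the end of the text is kept regardless, as documented
--     by A's explicit end-of-text case)."""
--     def is_latin(c):
--         return 'A' <= c <= 'Z' or 'a' <= c <= 'z' or c in "'-."
--     n = len(text)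
--     segments = []
--     i = 0
--     while i < n:
--         if is_latin(text[i]):
--             j = i + 1
--             while j < n and is_latin(text[j]):
--                 j += 1
--             if j - i > 2 or j == n:
--                 segments.append((i, j))
--             i = j
--         else:
--             i += 1
--     return segments
-- ===== Notes on version B (the rewrite author's own statement) =====
-- stated objective: alternative
-- what changed: Replaces A's per-character state machine (Optional current_start updated on every character) with a run-scanner: an outer loop that, on meeting a Latin character, skips the whole maximal Latin run with an inner scan and emits the segment at once.
import Mathlib
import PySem

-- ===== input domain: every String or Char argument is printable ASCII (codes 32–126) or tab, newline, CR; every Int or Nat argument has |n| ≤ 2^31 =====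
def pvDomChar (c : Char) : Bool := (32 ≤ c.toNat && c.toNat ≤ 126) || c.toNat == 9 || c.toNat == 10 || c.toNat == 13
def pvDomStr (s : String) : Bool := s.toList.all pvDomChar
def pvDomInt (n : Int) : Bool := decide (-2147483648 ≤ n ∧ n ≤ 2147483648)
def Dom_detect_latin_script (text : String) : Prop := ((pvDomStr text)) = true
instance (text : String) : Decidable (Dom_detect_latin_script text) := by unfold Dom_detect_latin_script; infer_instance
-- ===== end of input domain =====

-- B replaces A's per-character current_start state machine by a run-scanner that
-- skips each maximal Latin run in one inner scan (alternative decomposition, same cost).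

-- shared character class: 'A'<=c<='Z' or 'a'<=c<='z' or c in "'-."
def latinChar (c : Char) : Bool :=
  ('A' ≤ c && c ≤ 'Z') || ('a' ≤ c && c ≤ 'z') || (c == '\'' || c == '-' || c == '.')

-- ===== PORT A =====
-- literal port: fold over enumerate(text) carrying (latin_segments, current_start),
-- then the final "text ends with Latin" append.
def aStep (st : List (Int × Int) × Option Int) (ic : Int × Char) :
    List (Int × Int) × Option Int :=
  let is_latin := latinChar ic.2
  if is_latin && st.2.isNone then
    (st.1, some ic.1)
  else if !is_latin && st.2.isSome then
    (if ic.1 - st.2.getD 0 > 2 then st.1 ++ [(st.2.getD 0, ic.1)] else st.1, none)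
  else st

def detect_latin_script (text : String) : List (Int × Int) :=
  let r := (PySem.List.enumerate text.toList 0).foldl aStep ([], none)
  match r.2 with
  | some s => r.1 ++ [(s, (text.toList.length : Int))]
  | none => r.1

-- ===== PORT B =====
-- length of the maximal leading Latin run
def latinRun : List Char → Nat
  | [] => 0
  | c :: rest => if latinChar c then latinRun rest + 1 else 0

-- outer scan: i is the current position, n the total length
def altScan (cs : List Char) (i : Int) (n : Int) : List (Int × Int) :=
  match cs with
  | [] => []
  | c :: rest =>
    if latinChar c then
      let k := latinRun rest
      let j := i + 1 + (k : Int)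
      (if j - i > 2 || j == n then [(i, j)] else []) ++ altScan (rest.drop k) j n
    else
      altScan rest (i + 1) n
termination_by cs.length
decreasing_by
  · simp only [List.length_cons, List.length_drop]
    omega
  · simp

def detect_latin_script_alt (text : String) : List (Int × Int) :=
  altScan text.toList 0 (text.toList.length : Int)

-- ===== PRECONDITION & SPEC =====
def Spec_detect_latin_script (text : String) (out : List (Int × Int)) : Prop := out = detect_latin_script_alt text
instance (text : String) (out : List (Int × Int)) : Decidable (Spec_detect_latin_script text out) := by unfold Spec_detect_latin_script; infer_instance

-- ===== CLAIM (what is proved, stated in full; the proofs are below) =====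
def Claim_equal_detect_latin_script : Prop := ∀ (text : String), Dom_detect_latin_script text → Spec_detect_latin_script text (detect_latin_script text)

-- ===== LEMMAS AND PROOFS =====

theorem latinRun_le (cs : List Char) : latinRun cs ≤ cs.length := by
  induction cs with
  | nil => simp [latinRun]
  | cons c rest ih => simp only [latinRun]; split <;> simp_all


-- recursive model of A's fold (cur = current_start); n is len(text), used by the tail append
def aGo : List Char → Int → Int → Option Int → List (Int × Int)
  | [], _, n, cur =>
    match cur with
    | some s => [(s, n)]
    | none => []
  | c :: rest, i, n, cur =>
    if latinChar c then
      match cur with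
      | none => aGo rest (i + 1) n (some i)
      | some _ => aGo rest (i + 1) n cur
    else
      match cur with
      | some s => (if i - s > 2 then [(s, i)] else []) ++ aGo rest (i + 1) n none
      | none => aGo rest (i + 1) n none

-- the final "text ends with Latin" append of A
def aFinish (n : Int) (r : List (Int × Int) × Option Int) : List (Int × Int) :=
  match r.2 with
  | some s => r.1 ++ [(s, n)]
  | none => r.1

theorem foldA (cs : List Char) (i n : Int) (cur : Option Int) (segs : List (Int × Int)) :
    aFinish n ((PySem.List.enumerate cs i).foldl aStep (segs, cur)) = segs ++ aGo cs i n cur := by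
  induction cs generalizing i cur segs with
  | nil =>
    cases cur <;> simp [PySem.List.enumerate, aFinish, aGo]
  | cons c rest ih =>
    rw [PySem.List.enumerate_cons]
    cases cur with
    | none =>
      by_cases h : latinChar c = true <;>
        simp [List.foldl_cons, aStep, h, aGo, ih]
    | some s =>
      by_cases h : latinChar c = true
      · simp [List.foldl_cons, aStep, h, aGo, ih]
      · by_cases h2 : i - s > 2 <;>
          simp [List.foldl_cons, aStep, h, aGo, ih, h2]

theorem aGo_some (cs : List Char) (i n s : Int) (h : i + cs.length = n) :
    aGo cs i n (some s) =
      (if i + (latinRun cs : Int) - s > 2 ∨ i + (latinRun cs : Int) = n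
        then [(s, i + (latinRun cs : Int))] else [])
      ++ aGo (cs.drop (latinRun cs)) (i + (latinRun cs : Int)) n none := by
  induction cs generalizing i s with
  | nil =>
    simp [latinRun, aGo] at h ⊢
    simp [h]
  | cons c rest ih =>
    by_cases hc : latinChar c = true
    · have h' : (i + 1) + (rest.length : Int) = n := by
        simp [List.length_cons] at h; omega
      have := ih (i + 1) s h'
      simp [aGo, hc, latinRun, this]
      have e : i + 1 + ((latinRun rest : Int)) = i + ((latinRun rest : Int) + 1) := by ring
      rw [e]
    · have hn : i < n := by simp [List.length_cons] at h; omega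
      simp [aGo, hc, latinRun]
      have hne : ¬(i = n) := by omega
      simp [hne]

theorem aGo_none_eq_altScan (cs : List Char) (i n : Int) (h : i + cs.length = n) :
    aGo cs i n none = altScan cs i n := by
  induction hcs : cs.length using Nat.strong_induction_on generalizing cs i with
  | _ m ih =>
    cases cs with
    | nil => simp [aGo, altScan]
    | cons c rest =>
      by_cases hc : latinChar c = true
      · have h' : (i + 1) + (rest.length : Int) = n := by
          simp [List.length_cons] at h; omega
        rw [altScan]
        simp only [hc, if_pos]
        rw [aGo]
        simp only [hc, if_pos]
        rw [aGo_some rest (i + 1) n i h']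
        have hk := latinRun_le rest
        have hdrop : ((rest.drop (latinRun rest)).length : Int)
            = (rest.length : Int) - (latinRun rest : Int) := by
          simp [List.length_drop]; omega
        have hrec := ih (rest.drop (latinRun rest)).length
          (by simp [List.length_drop] at *; omega)
          (rest.drop (latinRun rest)) (i + 1 + (latinRun rest : Int))
          (by omega) rfl
        rw [hrec]
        simp only [Bool.or_eq_true, decide_eq_true_eq, beq_iff_eq]
      · have h' : (i + 1) + (rest.length : Int) = n := by
          simp [List.length_cons] at h; omega
        rw [altScan, aGo]
        rw [if_neg hc, if_neg hc]
        exact ih rest.length (by simp only [List.length_cons] at hcs; omega) rest (i + 1) h' rfl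

-- ===== VERDICT (by name: the statement is the Claim_ definition above) =====
theorem detect_latin_script_spec : Claim_equal_detect_latin_script := by
  intro text _
  unfold Spec_detect_latin_script detect_latin_script detect_latin_script_alt
  show aFinish (text.toList.length : Int) _ = _
  rw [foldA]
  rw [aGo_none_eq_altScan _ _ _ (by simp)]
  simp
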